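-- pv_equiv track=rewrite | github.com/habrahgithub/node-backend-starter | vault/cli/swd_vault.py | risk_tags_for_files
-- ===== SOURCE A (Python) =====
-- from typing import Any, Dict, List, Optional, Sequence, Set, Tuple
--
-- def risk_tags_for_files(files: List[str]) -> List[str]:
--     text = " ".join(files).lower()
--     tags: List[str] = []
--     if any(token in text for token in ["licensing", "payments", "payment", "wps", "crypto", "auth"]):
--         tags.append("high_risk_surface")
--     if any(token.startswith("docs/") or "/docs/" in token for token in files):
--         tags.append("docs_touch")
--     return tags
-- ===== SOURCE B (Python) =====
-- _RISK_TOKENS = ("licensing", "payments", "payment", "wps", "crypto", "auth")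
--
-- def risk_tags_for_files(files):
--     high_risk = False
--     docs = False
--     for f in files:
--         low = f.lower()
--         high_risk = high_risk or any(t in low for t in _RISK_TOKENS)
--         docs = docs or f.startswith("docs/") or "/docs/" in f
--     return (["high_risk_surface"] if high_risk else []) + (["docs_touch"] if docs else [])
-- ===== Notes on version B (the rewrite author's own statement) =====
-- stated objective: alternative
-- what changed: B never builds the joined lowercase text: a single loop over the files maintains two booleans (risk token found in the per-file lowercase; docs path seen) and the tag list is assembled once at the end, instead of A's join-and-lower of the whole list followed by two separate any-scans.
import Mathlib
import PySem

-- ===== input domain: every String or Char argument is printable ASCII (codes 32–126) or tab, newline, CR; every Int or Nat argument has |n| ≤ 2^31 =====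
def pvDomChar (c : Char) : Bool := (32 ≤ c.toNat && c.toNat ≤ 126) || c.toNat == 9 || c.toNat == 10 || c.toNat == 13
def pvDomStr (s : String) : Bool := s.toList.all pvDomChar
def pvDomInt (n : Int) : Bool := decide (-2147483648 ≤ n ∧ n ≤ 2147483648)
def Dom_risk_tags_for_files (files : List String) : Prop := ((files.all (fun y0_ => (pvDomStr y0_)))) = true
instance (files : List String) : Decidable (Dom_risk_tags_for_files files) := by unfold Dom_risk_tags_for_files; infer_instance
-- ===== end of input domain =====

-- B replaces A's join-and-lower of the whole file list plus two separate any-scans by a single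
-- loop over the files carrying two booleans; same return value (objective: alternative).

-- ===== PORT A =====
def pvTokensA : List String := ["licensing", "payments", "payment", "wps", "crypto", "auth"]

def risk_tags_for_files (files : List String) : List String :=
  let text := PySem.Str.lower (PySem.Str.join " " files)
  let tags : List String := []
  let tags := if pvTokensA.any (fun token => PySem.Str.isIn token text) then tags ++ ["high_risk_surface"] else tags
  let tags := if files.any (fun token => PySem.Str.startswith token "docs/" || PySem.Str.isIn "/docs/" token) then tags ++ ["docs_touch"] else tags
  tags

-- ===== PORT B =====
def pvTokensB : List String := ["licensing", "payments", "payment", "wps", "crypto", "auth"]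

def risk_tags_for_files_alt (files : List String) : List String :=
  let st := files.foldl
    (fun (st : Bool × Bool) f =>
      let low := PySem.Str.lower f
      (st.1 || pvTokensB.any (fun t => PySem.Str.isIn t low),
       st.2 || (PySem.Str.startswith f "docs/" || PySem.Str.isIn "/docs/" f)))
    (false, false)
  (if st.1 then ["high_risk_surface"] else []) ++ (if st.2 then ["docs_touch"] else [])

-- ===== PRECONDITION & SPEC =====
def Spec_risk_tags_for_files (files : List String) (out : List String) : Prop := out = risk_tags_for_files_alt files
instance (files : List String) (out : List String) : Decidable (Spec_risk_tags_for_files files out) := by unfold Spec_risk_tags_for_files; infer_instance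

-- ===== CLAIM (what is proved, stated in full; the proofs are below) =====
def Claim_equal_risk_tags_for_files : Prop := ∀ (files : List String), Dom_risk_tags_for_files files → Spec_risk_tags_for_files files (risk_tags_for_files files)

-- ===== LEMMAS AND PROOFS =====
theorem pv_prefix_split (c : Char) : ∀ (t xs ys : List Char), c ∉ t → t <+: xs ++ c :: ys → t <+: xs := by
  intro t
  induction t with
  | nil => intro xs ys _ _; exact List.nil_prefix
  | cons a t ih =>
    intro xs ys hc hp
    cases xs with
    | nil =>
      rcases hp with ⟨r, hr⟩
      simp only [List.nil_append, List.cons_append, List.cons.injEq] at hr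
      exact absurd (show c ∈ a :: t by rw [← hr.1]; exact List.mem_cons_self) hc
    | cons x xs' =>
      rcases hp with ⟨r, hr⟩
      simp only [List.cons_append, List.cons.injEq] at hr
      obtain ⟨hax, hr⟩ := hr
      have ht : t <+: xs' := ih xs' ys (fun h => hc (List.mem_cons_of_mem _ h)) ⟨r, hr⟩
      subst hax
      rcases ht with ⟨r2, hr2⟩
      exact ⟨r2, by simp [← hr2]⟩

theorem pv_infix_split (c : Char) : ∀ (xs : List Char) (t ys : List Char), c ∉ t →
    t <:+: xs ++ c :: ys → t <:+: xs ∨ t <:+: ys := by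
  intro xs
  induction xs with
  | nil =>
    intro t ys hc hi
    simp only [List.nil_append, List.infix_cons_iff] at hi
    rcases hi with hp | hi
    · have : t <+: ([] : List Char) := pv_prefix_split c t [] ys hc hp
      exact Or.inl this.isInfix
    · exact Or.inr hi
  | cons x xs' ih =>
    intro t ys hc hi
    rw [List.cons_append, List.infix_cons_iff] at hi
    rcases hi with hp | hi
    · exact Or.inl (pv_prefix_split c t (x :: xs') ys hc hp).isInfix
    · rcases ih t ys hc hi with h | h
      · exact Or.inl (h.trans ⟨[x], [], by simp⟩)
      · exact Or.inr h

theorem pv_token_join (t : List Char) (hne : t ≠ []) (hsp : ' ' ∉ t) :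
    ∀ (ps : List (List Char)), (t <:+: PySem.Chars.join [' '] ps ↔ ∃ p ∈ ps, t <:+: p) := by
  intro ps
  induction ps with
  | nil =>
    simp [PySem.Chars.join, List.intercalate]
    intro h; exact hne h
  | cons p rest ih =>
    cases rest with
    | nil =>
      simp [PySem.Chars.join, List.intercalate]
    | cons q rest' =>
      rw [PySem.Chars.join_cons_cons]
      constructor
      · intro hi
        rw [List.append_assoc] at hi
        rcases pv_infix_split ' ' p t _ hsp (by simpa using hi) with h | h
        · exact ⟨p, by simp, h⟩
        · rcases ih.mp h with ⟨r, hr, hir⟩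
          exact ⟨r, by simp [hr], hir⟩
      · rintro ⟨r, hr, hir⟩
        simp only [List.mem_cons] at hr
        rcases hr with rfl | hr
        · exact hir.trans ⟨[], [' '] ++ PySem.Chars.join [' '] (q :: rest'), by simp⟩
        · have : t <:+: PySem.Chars.join [' '] (q :: rest') := ih.mpr ⟨r, List.mem_cons.mpr hr, hir⟩
          exact this.trans ⟨p ++ [' '], [], by simp⟩

theorem pv_lower_join (ps : List (List Char)) :
    PySem.Chars.lower (PySem.Chars.join [' '] ps) = PySem.Chars.join [' '] (ps.map PySem.Chars.lower) := by
  induction ps with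
  | nil => rfl
  | cons p rest ih =>
    cases rest with
    | nil => simp [PySem.Chars.join, List.intercalate]
    | cons q rest' =>
      rw [List.map_cons, PySem.Chars.join_cons_cons, List.map_cons, PySem.Chars.join_cons_cons]
      simp only [PySem.Chars.lower, List.map_append] at ih ⊢
      rw [ih]
      rfl

theorem pv_isIn_join (t : List Char) (hne : t ≠ []) (hsp : ' ' ∉ t) (ps : List (List Char)) :
    PySem.Chars.isIn t (PySem.Chars.join [' '] ps) = ps.any (fun p => PySem.Chars.isIn t p) := by
  rw [Bool.eq_iff_iff, PySem.Chars.isIn_iff_infix, List.any_eq_true]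
  constructor
  · intro h
    rcases (pv_token_join t hne hsp ps).mp h with ⟨p, hp, hip⟩
    exact ⟨p, hp, (PySem.Chars.isIn_iff_infix t p).mpr hip⟩
  · rintro ⟨p, hp, hip⟩
    exact (pv_token_join t hne hsp ps).mpr ⟨p, hp, (PySem.Chars.isIn_iff_infix t p).mp hip⟩

theorem pv_any_swap {α β : Type} (l : List α) (m : List β) (g : β → α → Bool) :
    m.any (fun t => l.any (g t)) = l.any (fun x => m.any (fun t => g t x)) := by
  rw [Bool.eq_iff_iff]
  simp only [List.any_eq_true]
  constructor
  · rintro ⟨t, ht, x, hx, h⟩; exact ⟨x, hx, t, ht, h⟩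
  · rintro ⟨x, hx, t, ht, h⟩; exact ⟨t, ht, x, hx, h⟩

-- B's single loop with the pair of flags computes the two any-scans
theorem pv_fold_pair (files : List String) (a b : Bool) :
    files.foldl
      (fun (st : Bool × Bool) f =>
        let low := PySem.Str.lower f
        (st.1 || pvTokensB.any (fun t => PySem.Str.isIn t low),
         st.2 || (PySem.Str.startswith f "docs/" || PySem.Str.isIn "/docs/" f)))
      (a, b)
    = (a || files.any (fun f => pvTokensB.any (fun t => PySem.Str.isIn t (PySem.Str.lower f))),
       b || files.any (fun f => PySem.Str.startswith f "docs/" || PySem.Str.isIn "/docs/" f)) := by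
  induction files generalizing a b with
  | nil => simp
  | cons f tl ih =>
    simp only [List.foldl_cons]
    rw [ih]
    simp [Bool.or_assoc]

-- a single (nonempty, space-free) token occurs in the lowered joined text iff in some lowered file
theorem pv_token_in_text (t : String) (hne : t.toList ≠ []) (hsp : ' ' ∉ t.toList) (files : List String) :
    PySem.Str.isIn t (PySem.Str.lower (PySem.Str.join " " files))
      = files.any (fun f => PySem.Str.isIn t (PySem.Str.lower f)) := by
  have htext : (PySem.Str.lower (PySem.Str.join " " files)).toList
      = PySem.Chars.join [' '] ((files.map String.toList).map PySem.Chars.lower) := by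
    rw [PySem.Str.toList_lower, PySem.Str.toList_join]
    exact pv_lower_join (files.map String.toList)
  rw [PySem.Str.isIn_eq, htext, pv_isIn_join t.toList hne hsp]
  simp [List.any_map, Function.comp_def, PySem.Str.isIn_eq, PySem.Str.toList_lower]

-- ===== VERDICT (by name: the statement is the Claim_ definition above) =====
theorem risk_tags_for_files_spec : Claim_equal_risk_tags_for_files := by
  intro files _
  show risk_tags_for_files files = risk_tags_for_files_alt files
  simp only [risk_tags_for_files, risk_tags_for_files_alt]
  rw [pv_fold_pair]
  have htok : ∀ t ∈ pvTokensA, t.toList ≠ [] ∧ ' ' ∉ t.toList := by decide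
  have hcond : pvTokensA.any (fun token => PySem.Str.isIn token (PySem.Str.lower (PySem.Str.join " " files)))
      = files.any (fun f => pvTokensB.any (fun t => PySem.Str.isIn t (PySem.Str.lower f))) := by
    rw [PySem.List.any_congr_mem
      (g := fun t => files.any (fun f => PySem.Str.isIn t (PySem.Str.lower f)))
      (fun t ht => pv_token_in_text t (htok t ht).1 (htok t ht).2 files)]
    exact pv_any_swap files pvTokensA (fun t f => PySem.Str.isIn t (PySem.Str.lower f))
  rw [hcond]
  rcases files.any (fun f => pvTokensB.any (fun t => PySem.Str.isIn t (PySem.Str.lower f))) with _ | _ <;>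
    rcases files.any (fun f => PySem.Str.startswith f "docs/" || PySem.Str.isIn "/docs/" f) with _ | _ <;> simp
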